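-- pv_equiv track=rewrite | github.com/mello9494/MachineLearning | Homework/Homework8/Exercise1/Exercise1.py | min_non_repeating
-- ===== SOURCE A (Python) =====
-- def min_non_repeating(nums):
--     min_val = nums[0]
--     vals = {}
--
--     for i in range(len(nums)):
--         if nums[i] in vals:
--             vals[nums[i]] += 1
--         else:
--             vals[nums[i]] = 1
--
--         min_val = max(nums[i], min_val)
--
--     for i in vals:
--         if vals[i] == 1 and i < min_val:
--             min_val = i
--
--     return min_val
-- ===== SOURCE B (Python) =====
-- def min_non_repeating(nums):
--     s = sorted(nums)
--     smallest_unique = None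
--     i = 0
--     n = len(s)
--     while i < n:
--         if i + 1 == n or s[i] != s[i + 1]:
--             smallest_unique = s[i]
--             break
--         v = s[i]
--         while i < n and s[i] == v:
--             i += 1
--     last = s[-1]
--     if smallest_unique is None:
--         return last
--     return min(smallest_unique, last)
-- ===== Notes on version B (the rewrite author's own statement) =====
-- stated objective: alternative
-- what changed: B sorts a copy of the list and scans consecutive runs for the first run of length 1 (the smallest unique value), taking min with the last (max) element, instead of A's dict-counting pass plus a key re-scan; Pre_ only excludes the empty list, where both raise IndexError.
import Mathlib
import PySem

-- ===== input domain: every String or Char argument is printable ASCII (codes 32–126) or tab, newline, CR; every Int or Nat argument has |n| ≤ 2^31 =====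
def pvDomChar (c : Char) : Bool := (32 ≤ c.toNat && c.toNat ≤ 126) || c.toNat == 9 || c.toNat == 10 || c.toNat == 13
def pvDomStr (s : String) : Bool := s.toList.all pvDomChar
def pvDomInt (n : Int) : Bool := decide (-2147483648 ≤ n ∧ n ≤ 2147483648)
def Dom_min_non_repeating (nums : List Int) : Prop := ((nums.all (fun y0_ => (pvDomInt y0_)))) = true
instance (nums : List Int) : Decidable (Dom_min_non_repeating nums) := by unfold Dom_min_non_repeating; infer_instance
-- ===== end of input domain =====

-- B sorts a copy and scans consecutive runs for the first (smallest) unique value instead of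
-- building a hash counter and re-scanning its keys; objective: alternative decomposition.

-- ===== PORT A =====
def min_non_repeating (nums : List Int) : Int :=
  match PySem.List.pyGet? nums 0 with
  | none => 0  -- nums[0] raises IndexError on []; excluded by Pre_
  | some first =>
    let st := (PySem.List.pyRange 0 (nums.length : Int) 1).foldl
      (fun (st : PySem.Dict Int Int × Int) i =>
        let x := PySem.List.pyGetD nums i 0
        (if st.1.contains x then st.1.insert x (st.1.getD x 0 + 1)
         else st.1.insert x 1,
         max x st.2))
      (PySem.Dict.empty, first)
    st.1.keys.foldl (fun m k => if st.1.getD k 0 = 1 ∧ k < m then k else m) st.2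

-- ===== PORT B =====
-- the run scan of Source B: advance past each run of equal values; the first run of length 1
-- yields the smallest unique value (the list is sorted)
def pvFirstUnique : List Int → Option Int
  | [] => none
  | [x] => some x
  | x :: y :: rest =>
    if x = y then pvFirstUnique ((y :: rest).dropWhile (fun z => z == x))
    else some x
termination_by l => l.length
decreasing_by
  have h := ((y :: rest).dropWhile_sublist (p := fun z => z == x)).length_le
  simp only [List.length_cons] at *
  omega

def min_non_repeating_alt (nums : List Int) : Int :=
  let s := PySem.List.sorted nums (fun x => x) false
  match PySem.List.pyGet? s (-1) with
  | none => 0  -- s[-1] raises IndexError on []; excluded by Pre_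
  | some last =>
    match pvFirstUnique s with
    | none => last
    | some u => min u last

-- ===== PRECONDITION & SPEC =====
def Pre_min_non_repeating (nums : List Int) : Prop := nums ≠ []
instance (nums : List Int) : Decidable (Pre_min_non_repeating nums) := by
  unfold Pre_min_non_repeating; infer_instance

def pvWitness_min_non_repeating : List Int := [3, 1, 2, 2]

def Spec_min_non_repeating (nums : List Int) (out : Int) : Prop := out = min_non_repeating_alt nums
instance (nums : List Int) (out : Int) : Decidable (Spec_min_non_repeating nums out) := by
  unfold Spec_min_non_repeating; infer_instance

-- ===== CLAIM (what is proved, stated in full; the proofs are below) =====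
def Claim_equal_min_non_repeating : Prop := ∀ (nums : List Int), Dom_min_non_repeating nums → Pre_min_non_repeating nums → Spec_min_non_repeating nums (min_non_repeating nums)

-- ===== LEMMAS AND PROOFS =====

-- the answer both programs compute: min over {max nums} ∪ {values occurring exactly once}
def pvIsAns (nums : List Int) (M r : Int) : Prop :=
  (r = M ∨ (r ∈ nums ∧ nums.count r = 1)) ∧ r ≤ M ∧ ∀ k ∈ nums, nums.count k = 1 → r ≤ k

theorem pvIsAns_unique {nums : List Int} {M r₁ r₂ : Int}
    (h₁ : pvIsAns nums M r₁) (h₂ : pvIsAns nums M r₂) : r₁ = r₂ := by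
  obtain ⟨m₁, le₁, lo₁⟩ := h₁
  obtain ⟨m₂, le₂, lo₂⟩ := h₂
  apply le_antisymm
  · rcases m₂ with h | ⟨hm, hc⟩
    · omega
    · exact lo₁ _ hm hc
  · rcases m₁ with h | ⟨hm, hc⟩
    · omega
    · exact lo₂ _ hm hc

theorem pv_fold_min_isAns (cnt : Int → Int) (ks : List Int) (M : Int) :
    let r := ks.foldl (fun m k => if cnt k = 1 ∧ k < m then k else m) M
    (r = M ∨ (r ∈ ks ∧ cnt r = 1)) ∧ r ≤ M ∧ ∀ k ∈ ks, cnt k = 1 → r ≤ k := by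
  induction ks generalizing M with
  | nil => simp
  | cons k ks ih =>
    simp only [List.foldl_cons, List.mem_cons]
    split_ifs with h
    · obtain ⟨hm, hle, hlo⟩ := ih k
      refine ⟨?_, by omega, ?_⟩
      · rcases hm with h' | ⟨h1, h2⟩
        · exact Or.inr ⟨Or.inl h', by rw [h']; exact h.1⟩
        · exact Or.inr ⟨Or.inr h1, h2⟩
      · rintro j (rfl | hj) hc
        · omega
        · exact hlo j hj hc
    · obtain ⟨hm, hle, hlo⟩ := ih M
      refine ⟨?_, hle, ?_⟩
      · rcases hm with h' | ⟨h1, h2⟩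
        · exact Or.inl h'
        · exact Or.inr ⟨Or.inr h1, h2⟩
      · rintro j (rfl | hj) hc
        · have : ¬ j < M := fun hlt => h ⟨hc, hlt⟩
          omega
        · exact hlo j hj hc

theorem pvChar_run (x : ℤ) (rest : List ℤ)
  (ih :
    List.Pairwise (fun a b => a ≤ b) (List.dropWhile (fun z => z == x) (x :: rest)) →
      (∀ (u : ℤ),
          pvFirstUnique (List.dropWhile (fun z => z == x) (x :: rest)) = some u →
            u ∈ List.dropWhile (fun z => z == x) (x :: rest) ∧
              List.count u (List.dropWhile (fun z => z == x) (x :: rest)) = 1 ∧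
                ∀ v ∈ List.dropWhile (fun z => z == x) (x :: rest),
                  List.count v (List.dropWhile (fun z => z == x) (x :: rest)) = 1 → u ≤ v) ∧
        (pvFirstUnique (List.dropWhile (fun z => z == x) (x :: rest)) = none →
          ∀ v ∈ List.dropWhile (fun z => z == x) (x :: rest),
            List.count v (List.dropWhile (fun z => z == x) (x :: rest)) ≠ 1))
  (hs : List.Pairwise (fun a b => a ≤ b) (x :: x :: rest)) :
  (∀ (u : ℤ),
      pvFirstUnique (x :: x :: rest) = some u →
        u ∈ x :: x :: rest ∧ List.count u (x :: x :: rest) = 1 ∧ ∀ v ∈ x :: x :: rest, List.count v (x :: x :: rest) = 1 → u ≤ v) ∧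
    (pvFirstUnique (x :: x :: rest) = none → ∀ v ∈ x :: x :: rest, List.count v (x :: x :: rest) ≠ 1) := by
  have hdrop : List.dropWhile (fun z => z == x) (x :: rest) = List.dropWhile (fun z => z == x) rest := by
    simp [List.dropWhile_cons_of_pos]
  rw [hdrop] at ih
  set t := List.dropWhile (fun z => z == x) rest with ht
  set w := List.takeWhile (fun z => z == x) rest with hwdef
  have hwt : w ++ t = rest := List.takeWhile_append_dropWhile
  have hprest : List.Pairwise (fun a b => a ≤ b) rest := (List.pairwise_cons.mp (List.pairwise_cons.mp hs).2).2
  have hpt : List.Pairwise (fun a b => a ≤ b) t := hprest.sublist (List.dropWhile_sublist _)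
  have hxle : ∀ v ∈ rest, x ≤ v := fun v hv => (List.pairwise_cons.mp (List.pairwise_cons.mp hs).2).1 v hv
  have hxt : ∀ v ∈ t, x < v := by
    intro v hv
    cases hc : t with
    | nil => rw [hc] at hv; cases hv
    | cons h tl =>
      have hhx : (h == x) = false := by
        have := List.head?_dropWhile_not (fun z => z == x) rest
        rw [← ht, hc] at this
        simpa using this
      have hne : h ≠ x := by simpa using hhx
      have hhm : h ∈ rest := (List.dropWhile_sublist _).subset (by rw [← ht, hc]; simp)
      have hxh : x < h := lt_of_le_of_ne (hxle h hhm) (Ne.symm hne)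
      rw [hc] at hv hpt
      rcases List.mem_cons.mp hv with rfl | hv'
      · exact hxh
      · exact lt_of_lt_of_le hxh ((List.pairwise_cons.mp hpt).1 v hv')
  have hwx : ∀ v ∈ w, v = x := by
    intro v hv; simpa using List.mem_takeWhile_imp hv
  have hcount : ∀ v, x < v → List.count v (x :: x :: rest) = List.count v t := by
    intro v hv
    have hvx : v ≠ x := by omega
    have hcw : List.count v w = 0 := by
      rw [List.count_eq_zero]; intro hm; exact hvx (hwx v hm)
    rw [← hwt]
    simp only [List.count_cons, List.count_append, hcw, beq_iff_eq]
    have : ¬ (x = v) := fun h => hvx h.symm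
    simp [this]
  have hcx : List.count x (x :: x :: rest) ≠ 1 := by
    simp only [List.count_cons, beq_self_eq_true, if_true]
    omega
  have hunfold : pvFirstUnique (x :: x :: rest) = pvFirstUnique t := by
    rw [pvFirstUnique, if_pos rfl, hdrop]
  have hmem : ∀ v ∈ x :: x :: rest, List.count v (x :: x :: rest) = 1 → v ∈ t := by
    intro v hv hc1
    have hvx : v ≠ x := fun h => hcx (h ▸ hc1)
    simp only [List.mem_cons] at hv
    rcases hv with rfl | rfl | hv
    · exact absurd rfl hvx
    · exact absurd rfl hvx
    · rw [← hwt] at hv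
      rcases List.mem_append.mp hv with hvw | hvt
      · exact absurd (hwx v hvw) hvx
      · exact hvt
  constructor
  · intro u hu
    rw [hunfold] at hu
    obtain ⟨hut, hcu, hmin⟩ := (ih hpt).1 u hu
    have hxu := hxt u hut
    refine ⟨?_, ?_, ?_⟩
    · have : u ∈ rest := (List.dropWhile_sublist _).subset hut
      exact List.mem_cons_of_mem _ (List.mem_cons_of_mem _ this)
    · rw [hcount u hxu]; exact hcu
    · intro v hv hc1
      have hvt := hmem v hv hc1
      exact hmin v hvt (by rw [← hcount v (hxt v hvt)]; exact hc1)
  · intro hnone v hv hc1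
    rw [hunfold] at hnone
    have hvt := hmem v hv hc1
    exact (ih hpt).2 hnone v hvt (by rw [← hcount v (hxt v hvt)]; exact hc1)

theorem pvChar_head (x y : ℤ) (rest : List ℤ) (h : ¬x = y)
  (hs : List.Pairwise (fun a b => a ≤ b) (x :: y :: rest)) :
  (∀ (u : ℤ),
      pvFirstUnique (x :: y :: rest) = some u →
        u ∈ x :: y :: rest ∧
          List.count u (x :: y :: rest) = 1 ∧ ∀ v ∈ x :: y :: rest, List.count v (x :: y :: rest) = 1 → u ≤ v) ∧
    (pvFirstUnique (x :: y :: rest) = none → ∀ v ∈ x :: y :: rest, List.count v (x :: y :: rest) ≠ 1) := by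
  have hxle : ∀ v ∈ y :: rest, x ≤ v := (List.pairwise_cons.mp hs).1
  have hyle : ∀ v ∈ rest, y ≤ v := (List.pairwise_cons.mp (List.pairwise_cons.mp hs).2).1
  have hxy : x < y := lt_of_le_of_ne (hxle y (List.mem_cons_self)) h
  have hnot : x ∉ y :: rest := by
    intro hm
    rcases List.mem_cons.mp hm with rfl | hm'
    · omega
    · have := hyle x hm'; omega
  have hunfold : pvFirstUnique (x :: y :: rest) = some x := by
    rw [pvFirstUnique, if_neg h]
  constructor
  · intro u hu
    rw [hunfold] at hu
    injection hu with hu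
    subst hu
    refine ⟨List.mem_cons_self, ?_, ?_⟩
    · rw [List.count_cons_self, List.count_eq_zero.mpr hnot]
    · intro v hv _
      rcases List.mem_cons.mp hv with rfl | hv'
      · exact le_refl _
      · exact hxle v hv'
  · intro hn
    rw [hunfold] at hn
    cases hn

theorem pvFirstUnique_char : ∀ (s : List Int), s.Pairwise (· ≤ ·) →
    ((∀ u, pvFirstUnique s = some u → u ∈ s ∧ s.count u = 1 ∧ ∀ v ∈ s, s.count v = 1 → u ≤ v) ∧
    (pvFirstUnique s = none → ∀ v ∈ s, s.count v ≠ 1)) := by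
  intro s
  induction s using pvFirstUnique.induct with
  | case1 => intro _; simp [pvFirstUnique]
  | case2 x => intro _; simp [pvFirstUnique]
  | case3 x rest ih => exact pvChar_run x rest ih
  | case4 x y rest h => exact pvChar_head x y rest h

theorem pvFirstUnique_some {s : List Int} (hs : s.Pairwise (· ≤ ·)) {u : Int}
    (h : pvFirstUnique s = some u) :
    u ∈ s ∧ s.count u = 1 ∧ ∀ v ∈ s, s.count v = 1 → u ≤ v :=
  (pvFirstUnique_char _ hs).1 u h

theorem pvFirstUnique_none {s : List Int} (hs : s.Pairwise (· ≤ ·))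
    (h : pvFirstUnique s = none) : ∀ v ∈ s, s.count v ≠ 1 :=
  (pvFirstUnique_char _ hs).2 h

theorem pvA_isAns (x : Int) (xs : List Int) :
    pvIsAns (x :: xs) (xs.foldl max x) (min_non_repeating (x :: xs)) := by
  have hstep : (fun (d : PySem.Dict Int Int) (e : Int) =>
      if d.contains e then d.insert e (d.getD e 0 + 1) else d.insert e 1)
      = (fun (d : PySem.Dict Int Int) (e : Int) => d.insert e (d.getD e 0 + 1)) := by
    funext d e
    by_cases h : d.contains e = true
    · simp [h]
    · have hf : d.contains e = false := by simpa using h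
      rw [if_neg (by simp [hf]), PySem.Dict.getD_of_not_contains (h := hf)]; norm_num
  have key : min_non_repeating (x :: xs)
      = (PySem.Set.ofList (x :: xs)).foldl
          (fun m k => if (((x :: xs).count k : Int)) = 1 ∧ k < m then k else m)
          (xs.foldl max x) := by
    simp only [min_non_repeating, PySem.List.pyGet?_zero_cons]
    rw [PySem.List.foldl_pyRange_zero_pyGetD' (x :: xs) 0
      (fun (st : PySem.Dict Int Int × Int) e =>
        (if st.1.contains e then st.1.insert e (st.1.getD e 0 + 1) else st.1.insert e 1,
         max e st.2))
      (PySem.Dict.empty, x)]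
    rw [PySem.List.foldl_prod_mk
      (f := fun (d : PySem.Dict Int Int) e => if d.contains e then d.insert e (d.getD e 0 + 1) else d.insert e 1)
      (g := fun (m : Int) e => max e m)]
    rw [hstep, PySem.Dict.foldl_insert_getD_add_one_eq_counter]
    have hmax : (x :: xs).foldl (fun (m e : Int) => max e m) x = xs.foldl max x := by
      have hc : (fun (m e : Int) => max e m) = (fun (m e : Int) => max m e) := by
        funext m e; exact max_comm e m
      rw [hc, List.foldl_cons, max_self]
    rw [hmax]
    simp only [PySem.Dict.getD_counter, PySem.Dict.keys_counter]
  rw [key]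
  obtain ⟨hm, hle, hlo⟩ := pv_fold_min_isAns
    (fun k => (((x :: xs).count k : Int))) (PySem.Set.ofList (x :: xs)) (xs.foldl max x)
  refine ⟨?_, hle, ?_⟩
  · rcases hm with h | ⟨h1, h2⟩
    · exact Or.inl h
    · exact Or.inr ⟨(PySem.Set.mem_ofList _ _).mp h1, by exact_mod_cast h2⟩
  · intro k hk hc
    exact hlo k ((PySem.Set.mem_ofList _ _).mpr hk) (by exact_mod_cast hc)

theorem pv_le_getLast : ∀ (s : List Int), s.Pairwise (· ≤ ·) → ∀ v ∈ s, ∀ L, s.getLast? = some L → v ≤ L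
  | [], _, v, hv, _, _ => absurd hv (List.not_mem_nil)
  | [a], _, v, hv, L, hL => by
    simp at hv hL; omega
  | a :: b :: t, h, v, hv, L, hL => by
    have hL' : (b :: t).getLast? = some L := by
      rwa [List.getLast?_cons_cons] at hL
    rcases List.mem_cons.mp hv with rfl | hv'
    · exact le_trans (le_refl v) ((List.pairwise_cons.mp h).1 L (List.mem_of_getLast? hL'))
    · exact pv_le_getLast (b :: t) (List.pairwise_cons.mp h).2 v hv' L hL'

theorem pvB_isAns (x : Int) (xs : List Int) :
    pvIsAns (x :: xs) (xs.foldl max x) (min_non_repeating_alt (x :: xs)) := by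
  set M := xs.foldl max x with hM
  have hperm : (PySem.List.sorted (x :: xs) (fun v => v) false).Perm (x :: xs) :=
    PySem.List.sorted_perm _ _ _
  have hpw : (PySem.List.sorted (x :: xs) (fun v => v) false).Pairwise (· ≤ ·) := by
    have := PySem.List.sorted_pairwise (xs := x :: xs) (key := fun v => v)
    simpa using this
  set s := PySem.List.sorted (x :: xs) (fun v => v) false with hsdef
  have hsne : s ≠ [] := by
    intro h; have := hperm.length_eq; rw [h] at this; simp at this
  have hMprop := PySem.List.le_foldl_max xs x
  have hMmax : ∀ v ∈ x :: xs, v ≤ M := by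
    intro v hv
    rcases List.mem_cons.mp hv with rfl | hv'
    · exact hMprop.1
    · exact hMprop.2 v hv'
  have hMmem : M ∈ x :: xs := by
    rcases PySem.List.foldl_max_mem xs x with h | h
    · rw [← hM] at h; rw [h]; exact List.mem_cons_self
    · exact List.mem_cons_of_mem _ h
  obtain ⟨L, hL⟩ : ∃ L, s.getLast? = some L :=
    ⟨s.getLast hsne, List.getLast?_eq_some_getLast hsne⟩
  have hLmem : L ∈ s := List.mem_of_getLast? hL
  have hLM : L = M :=
    le_antisymm (hMmax L (hperm.subset hLmem))
      (pv_le_getLast s hpw M (hperm.mem_iff.mpr hMmem) L hL)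
  have hcnt : ∀ v, s.count v = (x :: xs).count v := fun v => hperm.count_eq v
  have hrw : min_non_repeating_alt (x :: xs)
      = (match pvFirstUnique s with
         | none => L
         | some u => min u L) := by
    rw [min_non_repeating_alt]
    rw [← hsdef, PySem.List.pyGet?_neg_one, hL]
  rw [hrw]
  cases hFU : pvFirstUnique s with
  | none =>
    have hnone := pvFirstUnique_none hpw hFU
    refine ⟨Or.inl hLM, le_of_eq hLM, ?_⟩
    intro k hk hc
    exact absurd ((hcnt k).trans hc) (hnone k (hperm.mem_iff.mpr hk))
  | some u =>
    obtain ⟨huS, hcu, humin⟩ := pvFirstUnique_some hpw hFU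
    have huM : u ≤ M := hMmax u (hperm.subset huS)
    have hmin : min u L = u := min_eq_left (hLM ▸ huM)
    simp only []
    rw [hmin]
    refine ⟨Or.inr ⟨hperm.subset huS, by rw [← hcnt u]; exact hcu⟩, huM, ?_⟩
    intro k hk hc
    exact humin k (hperm.mem_iff.mpr hk) ((hcnt k).trans hc)

-- ===== VERDICT (by name: the statement is the Claim_ definition above) =====
theorem min_non_repeating_spec : Claim_equal_min_non_repeating := by
  intro nums _ hpre
  cases nums with
  | nil => exact absurd rfl hpre
  | cons x xs =>
    exact pvIsAns_unique (pvA_isAns x xs) (pvB_isAns x xs)
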